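-- pv_equiv track=rewrite | github.com/broadinstitute/long-read-pipelines | docker/lr-jellyfish/graph_construction_jellyfish.py | map_to_genome
-- ===== SOURCE A (Python) =====
-- from collections import defaultdict
--
-- def map_to_genome(contig, anchorlist, k):
--     PositionDict = defaultdict(list)
--     for anchor in anchorlist:
--         PositionDict[anchor]
--     for i in range(1, len(contig) - k + 1):
--         kmer = contig[i:i+k]
--         if kmer in PositionDict:
--             PositionDict[kmer] = PositionDict.get(kmer, []) + [i]
--     return PositionDict
-- ===== SOURCE B (Python) =====
-- from collections import defaultdict
--
-- def occurrence_positions(contig, anchor, k):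
--     # positions i >= 1 (scan starts at 1) where contig[i:i+k] equals this anchor
--     return [i for i in range(1, len(contig) - k + 1) if contig[i:i+k] == anchor]
--
-- def map_to_genome(contig, anchorlist, k):
--     result = defaultdict(list)
--     for anchor in anchorlist:
--         result[anchor] = occurrence_positions(contig, anchor, k)
--     return result
-- ===== Notes on version B (the rewrite author's own statement) =====
-- stated objective: alternative
-- what changed: B interchanges the loops: instead of pre-seeding the anchor dict and making one scan over contig that filters every k-mer through a dict membership test, B computes each anchor's occurrence positions by its own scan over contig positions and assembles the dict from those per-anchor lists (no membership test, no dict mutation during the scan).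
import Mathlib
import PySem

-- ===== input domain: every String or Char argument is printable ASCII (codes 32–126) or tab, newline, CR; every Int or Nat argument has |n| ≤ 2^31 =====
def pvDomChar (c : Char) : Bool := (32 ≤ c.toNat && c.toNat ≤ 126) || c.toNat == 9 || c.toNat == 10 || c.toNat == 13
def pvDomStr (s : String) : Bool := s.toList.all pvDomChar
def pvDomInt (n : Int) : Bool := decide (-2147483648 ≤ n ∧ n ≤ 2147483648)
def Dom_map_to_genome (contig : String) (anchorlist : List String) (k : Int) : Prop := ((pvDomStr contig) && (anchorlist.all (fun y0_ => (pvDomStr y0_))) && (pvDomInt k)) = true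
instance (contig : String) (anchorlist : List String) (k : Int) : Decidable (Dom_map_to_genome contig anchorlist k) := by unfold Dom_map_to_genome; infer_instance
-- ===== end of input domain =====

-- B interchanges the loops: instead of one dict-filtered scan over contig, it computes each
-- anchor's positions by its own scan and assembles the dict from them (alternative, not faster).

-- ===== PORT A =====
def map_to_genome (contig : String) (anchorlist : List String) (k : Int) : List (String × List Int) :=
  let d0 : PySem.Dict String (List Int) :=
    anchorlist.foldl (fun d anchor => d.setdefault anchor []) PySem.Dict.empty
  let d :=
    (PySem.List.pyRange 1 (PySem.Str.len contig - k + 1) 1).foldl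
      (fun d i =>
        let kmer := PySem.Str.slice contig (some i) (some (i + k))
        if d.contains kmer then d.insert kmer (d.getD kmer [] ++ [i]) else d) d0
  d.items

-- ===== PORT B =====
-- '[i for i in range(1, len(contig)-k+1) if contig[i:i+k] == anchor]' is a filter of the range
def occurrencePositions (contig : String) (anchor : String) (k : Int) : List Int :=
  (PySem.List.pyRange 1 (PySem.Str.len contig - k + 1) 1).filter
    (fun i => PySem.Str.slice contig (some i) (some (i + k)) == anchor)

def map_to_genome_alt (contig : String) (anchorlist : List String) (k : Int) : List (String × List Int) :=
  (anchorlist.foldl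
      (fun result anchor => result.insert anchor (occurrencePositions contig anchor k))
      (PySem.Dict.empty : PySem.Dict String (List Int))).items

-- ===== PRECONDITION & SPEC =====
def Spec_map_to_genome (contig : String) (anchorlist : List String) (k : Int) (out : List (String × List Int)) : Prop := out = map_to_genome_alt contig anchorlist k
instance (contig : String) (anchorlist : List String) (k : Int) (out : List (String × List Int)) : Decidable (Spec_map_to_genome contig anchorlist k out) := by unfold Spec_map_to_genome; infer_instance

-- ===== CLAIM (what is proved, stated in full; the proofs are below) =====
def Claim_equal_map_to_genome : Prop := ∀ (contig : String) (anchorlist : List String) (k : Int), Dom_map_to_genome contig anchorlist k → Spec_map_to_genome contig anchorlist k (map_to_genome contig anchorlist k)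

-- ===== LEMMAS AND PROOFS =====

-- A's seeding loop: keys are the distinct anchors in first-occurrence order, all values empty.
theorem seed_keys (anchorlist : List String) :
    (anchorlist.foldl (fun d anchor => d.setdefault anchor ([] : List Int)) PySem.Dict.empty).keys
      = PySem.Set.ofList anchorlist := by
  rw [← PySem.Set.update_empty]
  have h : ∀ (xs : List String) (d : PySem.Dict String (List Int)),
      (xs.foldl (fun d anchor => d.setdefault anchor []) d).keys = PySem.Set.update d.keys xs := by
    intro xs
    induction xs with
    | nil => intro d; simp [PySem.Set.update_nil]
    | cons x xs ih =>
      intro d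
      rw [List.foldl_cons, ih, PySem.Set.update_cons]
      congr 1
      rw [PySem.Dict.keys_setdefault, PySem.Set.add_eq_ite]
      by_cases hc : d.contains x = true
      · simp [hc, (PySem.Dict.contains_iff_mem_keys d x).mp hc]
      · have : x ∉ d.keys := fun hm => hc ((PySem.Dict.contains_iff_mem_keys d x).mpr hm)
        simp [hc, this]
  simpa [PySem.Dict.keys_empty] using h anchorlist PySem.Dict.empty

theorem seed_getD (anchorlist : List String) (a : String) :
    (anchorlist.foldl (fun d anchor => d.setdefault anchor ([] : List Int)) PySem.Dict.empty).getD a []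
      = [] := by
  have h : ∀ (xs : List String) (d : PySem.Dict String (List Int)),
      (∀ b, d.getD b [] = []) → (xs.foldl (fun d anchor => d.setdefault anchor []) d).getD a [] = [] := by
    intro xs
    induction xs with
    | nil => intro d hd; exact hd a
    | cons x xs ih =>
      intro d hd
      rw [List.foldl_cons]
      refine ih _ (fun b => ?_)
      by_cases hc : d.contains x = true
      · rw [PySem.Dict.setdefault_of_contains _ _ hc]; exact hd b
      · rw [PySem.Dict.setdefault_of_not_contains _ _ (by simpa using hc),
            PySem.Dict.getD_insert]
        split_ifs with h1
        · rfl
        · exact hd b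
  exact h anchorlist PySem.Dict.empty (fun b => by simp [PySem.Dict.getD_empty])

-- A's scan loop preserves the key set …
theorem scanA_keys (R : List Int) (s : Int → String) (d : PySem.Dict String (List Int)) :
    (R.foldl (fun d i => if d.contains (s i) then d.insert (s i) (d.getD (s i) [] ++ [i]) else d) d).keys
      = d.keys := by
  induction R generalizing d with
  | nil => rfl
  | cons i R ih =>
    rw [List.foldl_cons]
    by_cases hc : d.contains (s i) = true
    · rw [if_pos hc, ih, PySem.Dict.keys_insert_of_contains _ _ hc]
    · rw [if_neg hc, ih]

-- … and its value at any key is the old value plus the filtered positions.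
theorem scanA_getD (R : List Int) (s : Int → String) (a : String) (d : PySem.Dict String (List Int)) :
    (R.foldl (fun d i => if d.contains (s i) then d.insert (s i) (d.getD (s i) [] ++ [i]) else d) d).getD a []
      = d.getD a [] ++ R.filter (fun i => d.contains (s i) && (s i == a)) := by
  induction R generalizing d with
  | nil => simp
  | cons i R ih =>
    rw [List.foldl_cons, List.filter_cons]
    by_cases hc : d.contains (s i) = true
    · rw [if_pos hc, ih]
      have hck : ∀ b, ((d.insert (s i) (d.getD (s i) [] ++ [i])).contains b) = d.contains b := by
        intro b
        rw [PySem.Dict.contains_insert]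
        by_cases hb : b = s i
        · simp [hb, hc]
        · simp [hb]
      by_cases ha : s i = a
      · subst ha
        simp only [hc, Bool.true_and, BEq.rfl, if_pos]
        rw [PySem.Dict.getD_insert_self]
        rw [List.filter_congr (fun j _ => by rw [hck (s j)])]
        simp [List.append_assoc]
      · have hne : (s i == a) = false := by simp [ha]
        simp only [hc, Bool.true_and, hne, if_neg Bool.false_ne_true]
        rw [PySem.Dict.getD_insert_of_ne _ _ _ (by simpa using Ne.symm ha)]
        rw [List.filter_congr (fun j _ => by rw [hck (s j)])]
    · rw [if_neg hc, ih]
      have hcf : d.contains (s i) = false := by simpa using hc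
      simp [hcf]

-- B's assembly loop: keys and values.
theorem resultB_keys (anchorlist : List String) (v : String → List Int) :
    (anchorlist.foldl (fun d anchor => d.insert anchor (v anchor)) (PySem.Dict.empty : PySem.Dict String (List Int))).keys
      = PySem.Set.ofList anchorlist := by
  have := PySem.Dict.keys_foldl_insert anchorlist (fun _ x => v x) (PySem.Dict.empty : PySem.Dict String (List Int))
  simpa [PySem.Dict.keys_empty, PySem.Set.update_empty] using this

theorem resultB_getD (anchorlist : List String) (v : String → List Int) (a : String)
    (ha : a ∈ anchorlist) :
    (anchorlist.foldl (fun d anchor => d.insert anchor (v anchor)) (PySem.Dict.empty : PySem.Dict String (List Int))).getD a []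
      = v a := by
  have h : ∀ (xs : List String) (d : PySem.Dict String (List Int)), a ∈ xs →
      (xs.foldl (fun d anchor => d.insert anchor (v anchor)) d).getD a [] = v a := by
    intro xs
    induction xs with
    | nil => intro d h; cases h
    | cons x xs ih =>
      intro d hmem
      rw [List.foldl_cons]
      by_cases hx : a ∈ xs
      · exact ih _ hx
      · have hax : a = x := by
          rcases List.mem_cons.mp hmem with h | h
          · exact h
          · exact absurd h hx
        subst hax
        -- a ∉ xs: every later insert keeps the value at a
        have h2 : ∀ (ys : List String) (d' : PySem.Dict String (List Int)), a ∉ ys →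
            (ys.foldl (fun d anchor => d.insert anchor (v anchor)) d').getD a [] = d'.getD a [] := by
          intro ys
          induction ys with
          | nil => intro d' _; rfl
          | cons y ys ihy =>
            intro d' hny
            rw [List.foldl_cons, ihy _ (fun h => hny (List.mem_cons_of_mem _ h)),
                PySem.Dict.getD_insert]
            rw [if_neg (fun h => hny (by rw [h]; exact List.mem_cons_self))]
        rw [h2 xs _ hx, PySem.Dict.getD_insert_self]
  exact h anchorlist PySem.Dict.empty ha

-- ===== VERDICT (by name: the statement is the Claim_ definition above) =====
theorem map_to_genome_spec : Claim_equal_map_to_genome := by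
  intro contig anchorlist k _
  unfold Spec_map_to_genome map_to_genome map_to_genome_alt occurrencePositions
  set s : Int → String := fun i => PySem.Str.slice contig (some i) (some (i + k)) with hs
  set R : List Int := PySem.List.pyRange 1 (PySem.Str.len contig - k + 1) 1 with hR
  set d0 : PySem.Dict String (List Int) :=
    anchorlist.foldl (fun d anchor => d.setdefault anchor []) PySem.Dict.empty with hd0
  set dA : PySem.Dict String (List Int) :=
    R.foldl (fun d i => if d.contains (s i) then d.insert (s i) (d.getD (s i) [] ++ [i]) else d) d0 with hdA
  set dB : PySem.Dict String (List Int) :=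
    anchorlist.foldl (fun d anchor => d.insert anchor (R.filter (fun i => s i == anchor))) PySem.Dict.empty with hdB
  have hkA : dA.keys = PySem.Set.ofList anchorlist := by
    rw [hdA, scanA_keys, hd0, seed_keys]
  have hkB : dB.keys = PySem.Set.ofList anchorlist := by
    rw [hdB]; exact resultB_keys anchorlist _
  have hnA : dA.keys.Nodup := by rw [hkA]; exact PySem.Set.nodup_ofList _
  have hnB : dB.keys.Nodup := by rw [hkB]; exact PySem.Set.nodup_ofList _
  rw [PySem.Dict.items_eq_map_keys dA hnA [], PySem.Dict.items_eq_map_keys dB hnB [],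
      hkA, hkB]
  refine List.map_congr_left (fun a hmem => ?_)
  have hmem' : a ∈ anchorlist := (PySem.Set.mem_ofList _ _).mp hmem
  have hvA : dA.getD a [] = R.filter (fun i => s i == a) := by
    rw [hdA, scanA_getD, hd0, seed_getD, List.nil_append]
    refine List.filter_congr (fun j _ => ?_)
    by_cases hj : s j = a
    · have hc : d0.contains a = true := by
        rw [PySem.Dict.contains_iff_mem_keys, hd0, seed_keys, PySem.Set.mem_ofList]
        exact hmem'
      simp [hj, ← hd0, hc]
    · simp [hj]
  have hvB : dB.getD a [] = R.filter (fun i => s i == a) := by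
    rw [hdB, resultB_getD anchorlist (fun anchor => R.filter (fun i => s i == anchor)) a hmem']
  rw [hvA, hvB]
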